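-- pv_equiv track=rewrite | github.com/whitemagic-ai/whitemagic-clean | modular/max/python/max/_tensor_repr.py | _add_brackets
-- ===== SOURCE A (Python) =====
-- def _add_brackets(data: str, ndim: int) -> str:
--     """Add brackets around tensor data based on dimensionality.
--
--     Args:
--         data: The formatted tensor data.
--         ndim: Number of dimensions.
--
--     Returns:
--         Data with appropriate bracket wrapping.
--     """
--     if ndim == 0:
--         return data
--     if ndim == 1:
--         return f"[{data}]"
--
--     # Multi-dimensional: wrap with [ ] and indent continuation lines
--     lines = data.split("\n")
--     result = [f"[{lines[0]}"]
--     result.extend(" " + line for line in lines[1:])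
--     result[-1] = result[-1] + "]"
--     return "\n".join(result)
-- ===== SOURCE B (Python) =====
-- def _add_brackets(data: str, ndim: int) -> str:
--     """Add brackets around tensor data based on dimensionality."""
--     if ndim == 0:
--         return data
--     if ndim == 1:
--         return f"[{data}]"
--     # Multi-dimensional: one substitution indents every continuation line,
--     # then wrap the whole thing in brackets.
--     return "[" + data.replace("\n", "\n ") + "]"
-- ===== Notes on version B (the rewrite author's own statement) =====
-- stated objective: simpler
-- what changed: The multi-dimensional branch's split/list-build/extend/last-element-patch/join pipeline is replaced by a single str.replace that indents continuation lines, with the brackets concatenated around the result.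
import Mathlib
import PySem

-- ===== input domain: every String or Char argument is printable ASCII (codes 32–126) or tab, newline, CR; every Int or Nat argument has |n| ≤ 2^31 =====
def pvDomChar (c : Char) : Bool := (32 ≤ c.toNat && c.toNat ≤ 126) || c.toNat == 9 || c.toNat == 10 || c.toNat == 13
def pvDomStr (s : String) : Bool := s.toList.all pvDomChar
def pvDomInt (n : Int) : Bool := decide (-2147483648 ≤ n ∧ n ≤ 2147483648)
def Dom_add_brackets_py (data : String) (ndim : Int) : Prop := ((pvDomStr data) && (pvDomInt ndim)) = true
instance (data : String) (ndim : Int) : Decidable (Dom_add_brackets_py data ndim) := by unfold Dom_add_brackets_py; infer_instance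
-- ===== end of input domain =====

-- B replaces A's split/loop/join pipeline in the multi-dimensional branch by a single
-- string substitution ("\n" → "\n ") with the brackets concatenated around it (simpler).

-- ===== PORT A =====
-- Python's `result[-1] = result[-1] + "]"` on the (always nonempty) result list: hand-ported, exact.
def pvSetLastBracket : List (List Char) → List (List Char)
  | [] => []
  | [x] => [x ++ [']']]
  | x :: y :: ys => x :: pvSetLastBracket (y :: ys)

def add_brackets_py (data : String) (ndim : Int) : String :=
  if ndim == 0 then data
  else if ndim == 1 then String.ofList ('[' :: data.toList ++ [']'])
  else
    let lines := PySem.Chars.splitOn data.toList ['\n']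
    let result := ('[' :: PySem.List.pyGetD lines 0 []) ::
      (PySem.List.slice lines (some 1) none).map (fun line => ' ' :: line)
    String.ofList (PySem.Chars.join ['\n'] (pvSetLastBracket result))

-- ===== PORT B =====
def add_brackets_py_alt (data : String) (ndim : Int) : String :=
  if ndim == 0 then data
  else if ndim == 1 then String.ofList ('[' :: data.toList ++ [']'])
  else String.ofList ('[' :: PySem.Chars.replace data.toList ['\n'] ['\n', ' '] ++ [']'])

-- ===== PRECONDITION & SPEC =====
def Spec_add_brackets_py (data : String) (ndim : Int) (out : String) : Prop := out = add_brackets_py_alt data ndim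
instance (data : String) (ndim : Int) (out : String) : Decidable (Spec_add_brackets_py data ndim out) := by unfold Spec_add_brackets_py; infer_instance

-- ===== CLAIM (what is proved, stated in full; the proofs are below) =====
def Claim_equal_add_brackets_py : Prop := ∀ (data : String) (ndim : Int), Dom_add_brackets_py data ndim → Spec_add_brackets_py data ndim (add_brackets_py data ndim)

-- ===== LEMMAS AND PROOFS =====

-- `data.replace("\n", "\n ")` pointwise: each '\n' becomes "\n ", everything else stays.
def pvSubNl : List Char → List Char
  | [] => []
  | c :: t => if c = '\n' then '\n' :: ' ' :: pvSubNl t else c :: pvSubNl t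

-- `data.split("\n")` with an explicit current-piece accumulator (in order).
def pvPieces (cur : List Char) : List Char → List (List Char)
  | [] => [cur]
  | c :: t => if c = '\n' then cur :: pvPieces [] t else pvPieces (cur ++ [c]) t

theorem pvPieces_cons_nl (cur : List Char) (t : List Char) :
    pvPieces cur ('\n' :: t) = cur :: pvPieces [] t := by
  simp [pvPieces]

theorem pvPieces_cons_ne (cur : List Char) (c : Char) (t : List Char) (hc : c ≠ '\n') :
    pvPieces cur (c :: t) = pvPieces (cur ++ [c]) t := by
  simp [pvPieces, hc]

theorem pvPieces_ne_nil (cur : List Char) (l : List Char) : pvPieces cur l ≠ [] := by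
  induction l generalizing cur with
  | nil => simp [pvPieces]
  | cons c t ih =>
    simp only [pvPieces]
    split_ifs <;> simp [ih]

theorem pv_replace_go (fuel : Nat) : ∀ (l acc : List Char), l.length ≤ fuel →
    PySem.Chars.replace.go ['\n'] ['\n', ' '] fuel l acc = acc.reverse ++ pvSubNl l := by
  induction fuel with
  | zero =>
    intro l acc h
    have : l = [] := by cases l <;> simp_all
    subst this
    simp [PySem.Chars.replace.go, pvSubNl]
  | succ fuel ih =>
    intro l acc h
    cases l with
    | nil => simp [PySem.Chars.replace.go, pvSubNl]
    | cons c t =>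
      by_cases hc : c = '\n'
      · subst hc
        simp only [PySem.Chars.replace.go]
        rw [if_pos (by simp [List.isPrefixOf])]
        have hd : List.drop ['\n'].length ('\n' :: t) = t := rfl
        rw [hd, ih t (['\n', ' '].reverse ++ acc) (by simpa using Nat.le_of_succ_le_succ h)]
        simp [pvSubNl]
      · simp only [PySem.Chars.replace.go]
        rw [if_neg (by simp [List.isPrefixOf]; intro hcc; exact hc (by simpa using hcc.symm))]
        rw [ih t (c :: acc) (Nat.le_of_succ_le_succ h)]
        simp [pvSubNl, hc]

theorem pv_replace_eq (cs : List Char) :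
    PySem.Chars.replace cs ['\n'] ['\n', ' '] = pvSubNl cs := by
  simp only [PySem.Chars.replace, List.isEmpty]
  simpa using pv_replace_go cs.length cs [] (le_refl _)

theorem pv_splitOn_go (fuel : Nat) : ∀ (l cur : List Char) (acc : List (List Char)),
    l.length ≤ fuel →
    PySem.Chars.splitOn.go ['\n'] fuel l cur acc = acc.reverse ++ pvPieces cur.reverse l := by
  induction fuel with
  | zero =>
    intro l cur acc h
    have : l = [] := by cases l <;> simp_all
    subst this
    simp [PySem.Chars.splitOn.go, pvPieces]
  | succ fuel ih =>
    intro l cur acc h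
    cases l with
    | nil => simp [PySem.Chars.splitOn.go, pvPieces]
    | cons c t =>
      by_cases hc : c = '\n'
      · subst hc
        simp only [PySem.Chars.splitOn.go]
        rw [if_pos (by simp [List.isPrefixOf])]
        have hd : List.drop ['\n'].length ('\n' :: t) = t := rfl
        rw [hd, ih t [] (cur.reverse :: acc) (by simpa using Nat.le_of_succ_le_succ h)]
        simp [pvPieces]
      · simp only [PySem.Chars.splitOn.go]
        rw [if_neg (by simp [List.isPrefixOf]; intro hcc; exact hc (by simpa using hcc.symm))]
        rw [ih t (c :: cur) acc (Nat.le_of_succ_le_succ h)]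
        simp [pvPieces, hc]

theorem pv_splitOn_eq (cs : List Char) :
    PySem.Chars.splitOn cs ['\n'] = pvPieces [] cs := by
  simpa using pv_splitOn_go (cs.length + 1) cs [] [] (Nat.le_succ _)

-- join over the tail pieces, each indented by one space
theorem pv_join_spaced (l : List Char) : ∀ (cur : List Char),
    PySem.Chars.join ['\n'] ((pvPieces cur l).map (fun p => ' ' :: p)) = ' ' :: cur ++ pvSubNl l := by
  induction l with
  | nil => intro cur; simp [pvPieces, pvSubNl, PySem.Chars.join_singleton]
  | cons c t ih =>
    intro cur
    by_cases hc : c = '\n'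
    · subst hc
      rw [pvPieces_cons_nl, List.map_cons]
      obtain ⟨q, qs, hq⟩ : ∃ q qs, pvPieces ([] : List Char) t = q :: qs := by
        cases hqq : pvPieces ([] : List Char) t with
        | nil => exact absurd hqq (pvPieces_ne_nil _ _)
        | cons a b => exact ⟨a, b, rfl⟩
      rw [hq, List.map_cons, PySem.Chars.join_cons_cons]
      have := ih []
      rw [hq, List.map_cons] at this
      rw [this]
      simp [pvSubNl]
    · rw [pvPieces_cons_ne _ _ _ hc, ih (cur ++ [c])]
      simp [pvSubNl, hc]

-- join of the whole result list (first piece unindented)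
theorem pv_join_head (l : List Char) : ∀ (cur : List Char),
    PySem.Chars.join ['\n'] (((pvPieces cur l).headI) :: ((pvPieces cur l).tail.map (fun p => ' ' :: p)))
      = cur ++ pvSubNl l := by
  induction l with
  | nil => intro cur; simp [pvPieces, pvSubNl, PySem.Chars.join_singleton]
  | cons c t ih =>
    intro cur
    by_cases hc : c = '\n'
    · subst hc
      rw [pvPieces_cons_nl]
      simp only [List.headI, List.tail_cons]
      obtain ⟨q, qs, hq⟩ : ∃ q qs, pvPieces ([] : List Char) t = q :: qs := by
        cases hqq : pvPieces ([] : List Char) t with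
        | nil => exact absurd hqq (pvPieces_ne_nil _ _)
        | cons a b => exact ⟨a, b, rfl⟩
      rw [hq, List.map_cons, PySem.Chars.join_cons_cons]
      have := pv_join_spaced t []
      rw [hq, List.map_cons] at this
      rw [this]
      simp [pvSubNl]
    · rw [pvPieces_cons_ne _ _ _ hc, ih (cur ++ [c])]
      simp [pvSubNl, hc]

-- prepending a char to the first piece prepends it to the join
theorem pv_join_cons_head (x : Char) (a : List Char) (rest : List (List Char)) :
    PySem.Chars.join ['\n'] ((x :: a) :: rest) = x :: PySem.Chars.join ['\n'] (a :: rest) := by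
  cases rest with
  | nil => simp [PySem.Chars.join_singleton]
  | cons b bs =>
    rw [PySem.Chars.join_cons_cons, PySem.Chars.join_cons_cons]
    simp

theorem pvSetLastBracket_join (xs : List (List Char)) (h : xs ≠ []) :
    PySem.Chars.join ['\n'] (pvSetLastBracket xs)
      = PySem.Chars.join ['\n'] xs ++ [']'] := by
  induction xs with
  | nil => exact absurd rfl h
  | cons a as ih =>
    cases as with
    | nil => simp [pvSetLastBracket, PySem.Chars.join_singleton]
    | cons b bs =>
      simp only [pvSetLastBracket]
      obtain ⟨y, ys, hy⟩ : ∃ y ys, pvSetLastBracket (b :: bs) = y :: ys := by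
        cases bs <;> exact ⟨_, _, rfl⟩
      rw [hy, PySem.Chars.join_cons_cons, PySem.Chars.join_cons_cons]
      rw [← hy, ih (by simp)]
      simp

-- ===== VERDICT (by name: the statement is the Claim_ definition above) =====
theorem add_brackets_py_spec : Claim_equal_add_brackets_py := by
  intro data ndim _
  unfold Spec_add_brackets_py add_brackets_py add_brackets_py_alt
  by_cases h0 : ndim == 0
  · simp [h0]
  · by_cases h1 : ndim == 1
    · simp [h0, h1]
    · simp only [h0, h1, if_false, Bool.false_eq_true]
      rw [pv_replace_eq, pv_splitOn_eq]
      set cs := data.toList with hcs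
      obtain ⟨p0, ps, hp⟩ : ∃ p0 ps, pvPieces ([] : List Char) cs = p0 :: ps := by
        cases hpp : pvPieces ([] : List Char) cs with
        | nil => exact absurd hpp (pvPieces_ne_nil _ _)
        | cons a b => exact ⟨a, b, rfl⟩
      rw [hp]
      have hslice : PySem.List.slice (p0 :: ps) (some 1) none = ps := by
        simp [PySem.List.slice]
      have hget : PySem.List.pyGetD (p0 :: ps) 0 [] = p0 := by
        simp [pysem]
      rw [hslice, hget]
      rw [pvSetLastBracket_join _ (by simp)]
      rw [pv_join_cons_head]
      have := pv_join_head cs []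
      rw [hp] at this
      simp only [List.headI, List.tail_cons, List.nil_append] at this
      rw [this]
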